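-- pv_equiv track=rewrite | github.com/bc36/leetcode | lc_Python/LCP.py | minCount
-- ===== SOURCE A (Python) =====
-- from typing import List
--
-- def minCount(coins: List[int]) -> int:
--     ans = 0
--     for c in coins:
--         if c & 1:
--             ans += c // 2 + 1
--         else:
--             ans += c // 2
--     return ans
-- ===== SOURCE B (Python) =====
-- from typing import List
--
-- def minCount(coins: List[int]) -> int:
--     # group equal coin values once, then pay ceil(v/2) weighted by multiplicity
--     counts = {}
--     for c in coins:
--         counts[c] = counts.get(c, 0) + 1
--     ans = 0
--     for v, cnt in counts.items():
--         ans += cnt * ((v + 1) // 2)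
--     return ans
-- ===== Notes on version B (the rewrite author's own statement) =====
-- stated objective: alternative
-- what changed: Instead of accumulating ceil(c/2) per element with a parity branch, B builds a multiplicity dict of the coin values in one pass and then sums cnt * ((v + 1) // 2) over the distinct values, with no per-coin branch.
import Mathlib
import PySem

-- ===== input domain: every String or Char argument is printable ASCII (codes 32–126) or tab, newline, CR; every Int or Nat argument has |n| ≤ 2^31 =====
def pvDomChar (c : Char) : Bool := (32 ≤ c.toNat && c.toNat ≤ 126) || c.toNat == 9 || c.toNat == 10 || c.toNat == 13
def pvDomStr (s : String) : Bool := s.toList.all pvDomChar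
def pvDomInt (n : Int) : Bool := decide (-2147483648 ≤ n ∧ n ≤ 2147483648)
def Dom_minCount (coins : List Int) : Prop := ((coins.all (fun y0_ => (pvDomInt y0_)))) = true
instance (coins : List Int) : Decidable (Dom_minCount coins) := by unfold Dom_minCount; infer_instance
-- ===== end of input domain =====

-- B groups equal coin values in a dict built in one pass, then sums multiplicity * ceil(v/2) over the distinct values; objective: alternative (same O(n) cost, different data structure), return value only.


-- ===== PORT A =====
-- the for-loop over coins with accumulator ans, branching on parity (c & 1)
def minCountLoop : List Int → Int → Int
  | [], ans => ans
  | c :: rest, ans =>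
      if PySem.Int.band c 1 ≠ 0 then
        minCountLoop rest (ans + (PySem.Int.floordiv c 2 + 1))
      else
        minCountLoop rest (ans + PySem.Int.floordiv c 2)

def minCount (coins : List Int) : Int := minCountLoop coins 0

-- ===== PORT B =====
def minCount_alt (coins : List Int) : Int :=
  let counts := coins.foldl (fun d c => d.insert c (d.getD c 0 + 1)) PySem.Dict.empty
  counts.items.foldl (fun ans p => ans + p.2 * PySem.Int.floordiv (p.1 + 1) 2) 0

-- ===== PRECONDITION & SPEC =====
def Spec_minCount (coins : List Int) (out : Int) : Prop := out = minCount_alt coins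
instance (coins : List Int) (out : Int) : Decidable (Spec_minCount coins out) := by unfold Spec_minCount; infer_instance

-- ===== CLAIM (what is proved, stated in full; the proofs are below) =====
def Claim_equal_minCount : Prop := ∀ (coins : List Int), Dom_minCount coins → Spec_minCount coins (minCount coins)

-- ===== LEMMAS AND PROOFS =====
-- ceil(c/2) as both sides compute it
def pvCeilHalf (c : Int) : Int := PySem.Int.floordiv (c + 1) 2

theorem minCountLoop_eq_sum (coins : List Int) (ans : Int) :
    minCountLoop coins ans = ans + (coins.map pvCeilHalf).sum := by
  induction coins generalizing ans with
  | nil => simp [minCountLoop]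
  | cons c rest ih =>
    have h1 : PySem.Int.band c 1 = PySem.Int.mod c 2 := PySem.Int.band_one c
    have hm : PySem.Int.mod c 2 = c % 2 := PySem.Int.mod_eq_emod_of_pos (by omega)
    have hd : PySem.Int.floordiv c 2 = c / 2 := PySem.Int.floordiv_eq_ediv_of_pos (by omega)
    have hc : pvCeilHalf c = (c + 1) / 2 := PySem.Int.floordiv_eq_ediv_of_pos (by omega)
    simp only [minCountLoop, List.map_cons, List.sum_cons, ih, h1, hm, hd]
    split_ifs with h
    · rw [hc]; omega
    · rw [hc]; omega

theorem minCount_alt_eq_grouped (coins : List Int) :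
    minCount_alt coins =
      ((PySem.Set.ofList coins).map (fun k => (coins.count k : Int) * pvCeilHalf k)).sum := by
  show ((PySem.Dict.counter coins).items.foldl
      (fun ans p => ans + p.2 * PySem.Int.floordiv (p.1 + 1) 2) 0) = _
  rw [PySem.Dict.items_counter, PySem.List.foldl_add]
  simp [pvCeilHalf, Function.comp_def]

theorem toFinset_ofList (coins : List Int) :
    (PySem.Set.ofList coins).toFinset = coins.toFinset := by
  ext x
  simp [List.mem_toFinset, PySem.Set.mem_ofList]

-- ===== VERDICT (by name: the statement is the Claim_ definition above) =====
theorem minCount_spec : Claim_equal_minCount := by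
  intro coins _
  unfold Spec_minCount
  rw [minCount, minCountLoop_eq_sum, minCount_alt_eq_grouped, zero_add]
  rw [← List.sum_toFinset _ (PySem.Set.nodup_ofList coins), toFinset_ofList]
  rw [Finset.sum_list_map_count coins pvCeilHalf]
  simp
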